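-- pv_equiv track=rewrite | github.com/JohnnyP0T/SIT | lab3/CodeLab.py | code1
-- ===== SOURCE A (Python) =====
-- def code1(x,k):
--     s = []
--     for i in range(len(x)):
--         s.append(x[i])
--         if i - k >= 0:
--             s.append(int(bool(x[i]) != bool(x[i-k])))
--         else:
--             s.append(x[i])
--     for i in range(len(x),len(x) + k):
--             s.append(x[i-k])
--     return s
-- ===== SOURCE B (Python) =====
-- def code1(x, k):
--     n = len(x)
--     # second elements via slicing + zip of x against its own k-shift (no index arithmetic)
--     second = x[:k] + [int(bool(a) != bool(b)) for a, b in zip(x[k:], x)]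
--     # interleave by extended-slice assignment into a preallocated buffer
--     out = [0] * (2 * n)
--     out[0::2] = x
--     out[1::2] = second
--     # tail: circular read of the last k positions, one slice of x doubled
--     return out + (x + x)[2 * n - k:]
-- ===== Notes on version B (the rewrite author's own statement) =====
-- stated objective: alternative
-- what changed: A's single fused index loop with per-iteration branching appends is replaced by index-free data-flow: the XOR column is computed by zipping x against its own k-shifted slice (x[:k] + zip(x[k:], x)), the interleave is done by extended-slice assignment (out[0::2], out[1::2]) into a preallocated buffer, and the tail is one circular slice of x + x.
import Mathlib
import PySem

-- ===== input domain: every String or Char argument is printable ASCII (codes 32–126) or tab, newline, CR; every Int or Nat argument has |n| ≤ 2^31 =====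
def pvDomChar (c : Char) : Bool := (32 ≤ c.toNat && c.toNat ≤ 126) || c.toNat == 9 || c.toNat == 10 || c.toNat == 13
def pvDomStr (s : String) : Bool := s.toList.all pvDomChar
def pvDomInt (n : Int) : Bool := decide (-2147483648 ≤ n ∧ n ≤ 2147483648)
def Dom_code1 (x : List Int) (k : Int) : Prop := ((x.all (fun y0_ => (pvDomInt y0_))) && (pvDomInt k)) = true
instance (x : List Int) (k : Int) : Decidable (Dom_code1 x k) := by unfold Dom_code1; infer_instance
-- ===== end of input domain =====

-- B drops A's fused index loop entirely: the XOR column comes from zipping x against its own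
-- k-shifted slice, the interleave is done by stride-2 assignment into a preallocated buffer,
-- and the tail is one slice of x ++ x; objective: alternative decomposition, same cost.

-- ===== PORT A =====
-- literal transliteration: first loop appends x[i] then either the XOR bit or x[i] again;
-- second loop appends x[i-k] (Python negative-index wraparound via pyGetD; out-of-range
-- inputs, where Python raises IndexError, are excluded by Pre_code1)
def code1 (x : List Int) (k : Int) : List Int :=
  let s := (PySem.List.pyRange 0 (x.length : Int) 1).foldl (fun s i =>
    let s := s ++ [PySem.List.pyGetD x i 0]
    if i - k ≥ 0 then
      s ++ [if (PySem.List.pyGetD x i 0 ≠ 0) ↔ (PySem.List.pyGetD x (i - k) 0 ≠ 0) then 0 else 1]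
    else
      s ++ [PySem.List.pyGetD x i 0]) []
  (PySem.List.pyRange (x.length : Int) ((x.length : Int) + k) 1).foldl
    (fun s i => s ++ [PySem.List.pyGetD x (i - k) 0]) s

-- ===== PORT B =====
-- hand port of Python's extended-slice assignment out[start::2] = vals (exact for step 2 and
-- equal lengths, the only case B reaches): phase counter counts positions to skip
def setStride2 : List Int → Nat → List Int → List Int
  | [], _, _ => []
  | l, _, [] => l
  | _ :: l, 0, v :: vs => v :: setStride2 l 1 vs
  | a :: l, m + 1, vs => a :: setStride2 l m vs

def code1_alt (x : List Int) (k : Int) : List Int :=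
  let n : Int := x.length
  let second := PySem.List.slice x none (some k) ++
    ((PySem.List.slice x (some k) none).zip x).map
      (fun p => if (p.1 ≠ 0) ↔ (p.2 ≠ 0) then 0 else 1)
  let out := List.replicate (2 * x.length) (0 : Int)
  let out := setStride2 out 0 x
  let out := setStride2 out 1 second
  out ++ PySem.List.slice (x ++ x) (some (2 * n - k)) none

-- ===== PRECONDITION & SPEC =====
-- Pre_ = exactly the inputs on which A returns: k in [0, 2*len(x)] (negative tail indices
-- down to -len(x) still wrap), plus the degenerate x = [] with k < 0 where both loops are empty.
def Pre_code1 (x : List Int) (k : Int) : Prop :=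
  (0 ≤ k ∧ k ≤ 2 * (x.length : Int)) ∨ (x = [] ∧ k < 0)
instance (x : List Int) (k : Int) : Decidable (Pre_code1 x k) := by unfold Pre_code1; infer_instance
def pvWitness_code1 : List Int × Int := ([0, 3, 0, 5, 2], 7)
def Spec_code1 (x : List Int) (k : Int) (out : List Int) : Prop := out = code1_alt x k
instance (x : List Int) (k : Int) (out : List Int) : Decidable (Spec_code1 x k out) := by unfold Spec_code1; infer_instance

-- ===== CLAIM (what is proved, stated in full; the proofs are below) =====
def Claim_equal_code1 : Prop := ∀ (x : List Int) (k : Int), Dom_code1 x k → Pre_code1 x k → Spec_code1 x k (code1 x k)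

-- ===== LEMMAS AND PROOFS =====

theorem pv_setStride2_nil (l : List Int) (m : Nat) : setStride2 l m [] = l := by
  cases l <;> rfl

theorem pv_setStride2_one (y : Int) (l vs : List Int) :
    setStride2 (y :: l) 1 vs = y :: setStride2 l 0 vs := by
  cases vs with
  | nil => rw [pv_setStride2_nil, pv_setStride2_nil]
  | cons v vs => rfl

-- the two stride-2 assignments into the zero buffer produce exactly the interleave
theorem pv_interleave (xs : List Int) : ∀ (ss : List Int), xs.length = ss.length →
    setStride2 (setStride2 (List.replicate (2 * xs.length) (0 : Int)) 0 xs) 1 ss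
    = (xs.zip ss).flatMap (fun p => [p.1, p.2]) := by
  induction xs with
  | nil =>
      intro ss h
      cases ss with
      | nil => rfl
      | cons b ss => simp at h
  | cons a xs ih =>
      intro ss h
      cases ss with
      | nil => simp at h
      | cons b ss =>
        rw [List.length_cons, show 2 * (xs.length + 1) = 2 * xs.length + 1 + 1 from by omega,
            List.replicate_succ, List.replicate_succ]
        rw [show setStride2 (0 :: 0 :: List.replicate (2 * xs.length) (0 : Int)) 0 (a :: xs)
              = a :: setStride2 (0 :: List.replicate (2 * xs.length) 0) 1 xs from rfl,
            pv_setStride2_one]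
        rw [pv_setStride2_one]
        rw [show setStride2 (0 :: setStride2 (List.replicate (2 * xs.length) (0 : Int)) 0 xs)
                0 (b :: ss)
              = b :: setStride2 (setStride2 (List.replicate (2 * xs.length) 0) 0 xs) 1 ss
              from rfl]
        rw [ih ss (by simpa using h)]
        simp

-- congruence for flatMap over members
theorem pv_flatMap_congr {α β : Type} (l : List α) (f g : α → List β)
    (h : ∀ a ∈ l, f a = g a) : l.flatMap f = l.flatMap g := by
  induction l with
  | nil => rfl
  | cons a l ih =>
      simp only [List.flatMap_cons]
      rw [h a (by simp), ih (fun b hb => h b (by simp [hb]))]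

-- zip of a list with a comprehension over its index range, as a single map over the range
theorem pv_zip_map_range (x : List Int) (F : Int → Int) :
    x.zip ((PySem.List.pyRange 0 (x.length : Int) 1).map F)
    = (PySem.List.pyRange 0 (x.length : Int) 1).map
        (fun j => (PySem.List.pyGetD x j 0, F j)) := by
  apply List.ext_getElem
  · simp [PySem.List.length_pyRange_one]
  · intro j hj1 hj2
    have hjn : j < x.length := by
      simp [PySem.List.length_pyRange_one] at hj2; omega
    rw [List.getElem_zip, List.getElem_map, List.getElem_map,
        PySem.List.getElem_pyRange_one]
    simp [PySem.List.pyGetD_natCast, List.getD_eq_getElem?_getD, List.getElem?_eq_getElem hjn]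

-- B's slice-built second column, characterised index-wise over the range
theorem pv_second_eq (x : List Int) (k : Int) (hk : 0 ≤ k) :
    PySem.List.slice x none (some k) ++
      ((PySem.List.slice x (some k) none).zip x).map
        (fun p => if (p.1 ≠ 0) ↔ (p.2 ≠ 0) then 0 else 1)
    = (PySem.List.pyRange 0 (x.length : Int) 1).map (fun j =>
        if j < k then PySem.List.pyGetD x j 0
        else if (PySem.List.pyGetD x j 0 ≠ 0) ↔ (PySem.List.pyGetD x (j - k) 0 ≠ 0) then 0 else 1) := by
  rw [PySem.List.slice_to _ hk, PySem.List.slice_from _ hk]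
  apply List.ext_getElem
  · simp [PySem.List.length_pyRange_one]
    omega
  · intro j hj1 hj2
    have hjn : j < x.length := by
      simp [PySem.List.length_pyRange_one] at hj2; omega
    rw [List.getElem_map, PySem.List.getElem_pyRange_one]
    simp only [zero_add]
    by_cases hjk : j < k.toNat
    · have hlt : (j : Int) < k := by omega
      have h1 : PySem.List.pyGetD x (j : Int) 0 = x[j] :=
        PySem.List.pyGetD_eq_getElem _ _ (by omega) (by exact_mod_cast hjn)
      rw [List.getElem_append_left (by simp; omega), if_pos hlt, List.getElem_take, h1]
    · have hkn : k.toNat ≤ x.length := by omega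
      have hge : ¬ ((j : Int) < k) := by omega
      rw [List.getElem_append_right (by simp only [List.length_take]; omega)]
      have hlen : (x.take k.toNat).length = k.toNat := by simp; omega
      simp only [hlen, List.getElem_map, List.getElem_zip, List.getElem_drop]
      have h1 : PySem.List.pyGetD x (j : Int) 0 = x[j] :=
        PySem.List.pyGetD_eq_getElem _ _ (by omega) (by exact_mod_cast hjn)
      have h2 : PySem.List.pyGetD x ((j : Int) - k) 0 = x[j - k.toNat] := by
        rw [show (j : Int) - k = ((j - k.toNat : Nat) : Int) from by omega]
        exact PySem.List.pyGetD_eq_getElem _ _ (by omega) (by omega)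
      rw [if_neg hge, h1, h2]
      simp only [show k.toNat + (j - k.toNat) = j from by omega]

-- A's first loop, as a flatMap of two-element chunks
theorem pv_loop1_eq (x : List Int) (k : Int) (l : List Int) (init : List Int) :
    l.foldl (fun s i =>
      let s := s ++ [PySem.List.pyGetD x i 0]
      if i - k ≥ 0 then
        s ++ [if (PySem.List.pyGetD x i 0 ≠ 0) ↔ (PySem.List.pyGetD x (i - k) 0 ≠ 0) then 0 else 1]
      else
        s ++ [PySem.List.pyGetD x i 0]) init
    = init ++ l.flatMap (fun i =>
        [PySem.List.pyGetD x i 0,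
         if i - k ≥ 0 then
           (if (PySem.List.pyGetD x i 0 ≠ 0) ↔ (PySem.List.pyGetD x (i - k) 0 ≠ 0) then 0 else 1)
         else PySem.List.pyGetD x i 0]) := by
  induction l generalizing init with
  | nil => simp
  | cons a l ih =>
      simp only [List.foldl_cons, List.flatMap_cons, ih]
      split_ifs <;> simp

-- ===== VERDICT (by name: the statement is the Claim_ definition above) =====
theorem code1_spec : Claim_equal_code1 := by
  intro x k _hdom hpre
  unfold Spec_code1 code1 code1_alt
  rcases hpre with ⟨hk0, hk2⟩ | ⟨hx, hk⟩
  · -- main case 0 ≤ k ≤ 2n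
    rw [pv_loop1_eq, PySem.List.foldl_append_singleton_eq_map]
    simp only []
    rw [pv_second_eq x k hk0]
    have hlen2 : x.length
        = ((PySem.List.pyRange 0 (x.length : Int) 1).map (fun j =>
            if j < k then PySem.List.pyGetD x j 0
            else if (PySem.List.pyGetD x j 0 ≠ 0) ↔ (PySem.List.pyGetD x (j - k) 0 ≠ 0) then 0 else 1)).length := by
      simp [PySem.List.length_pyRange_one]
    rw [pv_interleave x _ hlen2, pv_zip_map_range, List.flatMap_map]
    have hfirst :
        (PySem.List.pyRange 0 (x.length : Int) 1).flatMap (fun i =>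
          [PySem.List.pyGetD x i 0,
           if i - k ≥ 0 then
             (if (PySem.List.pyGetD x i 0 ≠ 0) ↔ (PySem.List.pyGetD x (i - k) 0 ≠ 0) then 0 else 1)
           else PySem.List.pyGetD x i 0])
        = (PySem.List.pyRange 0 (x.length : Int) 1).flatMap (fun j =>
            [PySem.List.pyGetD x j 0,
             if j < k then PySem.List.pyGetD x j 0
             else if (PySem.List.pyGetD x j 0 ≠ 0) ↔ (PySem.List.pyGetD x (j - k) 0 ≠ 0) then 0 else 1]) := by
      apply pv_flatMap_congr
      intro i hi
      have hi' := (PySem.List.mem_pyRange_one).mp hi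
      by_cases h : i < k
      · have hno : ¬ (i - k ≥ 0) := by omega
        simp [h]
      · have hyes : i - k ≥ 0 := by omega
        simp [h]
    rw [hfirst]
    simp only [List.nil_append, List.append_cancel_left_eq]
    -- tails agree
    have h2nk : (0 : Int) ≤ 2 * (x.length : Int) - k := by omega
    rw [PySem.List.slice_from _ h2nk]
    apply List.ext_getElem
    · simp [PySem.List.length_pyRange_one]
      omega
    · intro j hj1 hj2
      have hjk : (j : Int) < k := by
        have := PySem.List.length_pyRange_one (a := (x.length : Int)) (b := (x.length : Int) + k)
        simp [this] at hj1
        omega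
      rw [List.getElem_map, PySem.List.getElem_pyRange_one]
      rw [List.getElem_drop]
      by_cases hneg : (x.length : Int) + j - k < 0
      · have h1 : (0:Int) < k - x.length - j := by omega
        have h2 : k - x.length - j ≤ (x.length : Int) := by omega
        have hm : (x.length : Int) + (j : Int) - k = -(((k - x.length - j).toNat : Nat) : Int) := by omega
        rw [show (x.length : Int) + (j : Int) - k = (x.length : Int) + j - k from by ring, hm]
        rw [PySem.List.pyGetD_neg_natCast _ _ _ (by omega) (by omega)]
        rw [List.getElem_append_left (by omega)]
        congr 1
        omega
      · rw [show (x.length : Int) + (j : Int) - k = (x.length : Int) + j - k from by ring]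
        rw [PySem.List.pyGetD_eq_getElem _ _ (by omega) (by omega)]
        rw [List.getElem_append_right (by omega)]
        congr 1
        omega
  · -- x = [], k < 0: both sides are []
    subst hx
    simp only [List.length_nil, Nat.cast_zero, zero_add, List.nil_append, Nat.mul_zero,
      List.replicate]
    rw [PySem.List.pyRange_one, PySem.List.pyRange_one]
    rw [show setStride2 [] 0 ([] : List Int) = [] from rfl]
    simp [PySem.List.slice, pv_setStride2_nil]
    intro a
    omega
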